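-- pv_equiv track=rewrite | github.com/jr008489900/CodeGame | MadPod-Silver.py | AnalyzeRecord
-- ===== SOURCE A (Python) =====
-- def AnalyzeRecord(record):
--     temp = [record[0]]
--     res=0
--     for i in range(1,len(record)):
--         if record[i-1] != record[i]:
--             if record[i] not in temp:
--                 temp.append(record[i])
--             else:
--                 res+=1
--     return res
-- ===== SOURCE B (Python) =====
-- def AnalyzeRecord(record):
--     first = record[0]
--     transitions = [record[i] for i in range(1, len(record)) if record[i] != record[i-1]]
--     return len(transitions) - len(set(transitions) - {first})
-- ===== Notes on version B (the rewrite author's own statement) =====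
-- stated objective: faster
-- what changed: Replaces the incremental seen-list with its per-step linear membership scan by one comprehension collecting transition targets plus a set-cardinality formula: result = number of transitions minus number of distinct transition targets other than the first element.
import Mathlib
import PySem

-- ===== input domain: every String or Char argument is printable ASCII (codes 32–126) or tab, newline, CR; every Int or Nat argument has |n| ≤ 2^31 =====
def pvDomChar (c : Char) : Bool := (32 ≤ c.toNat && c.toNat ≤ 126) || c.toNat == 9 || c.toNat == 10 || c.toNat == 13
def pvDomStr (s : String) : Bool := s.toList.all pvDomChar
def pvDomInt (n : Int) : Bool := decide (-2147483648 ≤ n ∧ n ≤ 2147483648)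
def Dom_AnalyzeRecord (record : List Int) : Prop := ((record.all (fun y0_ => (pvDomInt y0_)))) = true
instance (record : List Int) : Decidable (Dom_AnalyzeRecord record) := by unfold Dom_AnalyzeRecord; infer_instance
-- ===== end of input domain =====

-- B replaces A's incremental seen-list and per-step branching by a transitions list plus a
-- set-cardinality formula (faster: one pass with set lookups instead of a per-step list scan).

-- ===== PORT A =====
def AnalyzeRecord (record : List Int) : Int :=
  let st := (PySem.List.pyRange 1 (record.length : Int) 1).foldl
    (fun (s : List Int × Int) i =>
      if PySem.List.pyGetD record (i-1) 0 ≠ PySem.List.pyGetD record i 0 then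
        if PySem.List.pyGetD record i 0 ∉ s.1 then (s.1 ++ [PySem.List.pyGetD record i 0], s.2)
        else (s.1, s.2 + 1)
      else s)
    ([PySem.List.pyGetD record 0 0], 0)
  st.2

-- ===== PORT B =====
def AnalyzeRecord_alt (record : List Int) : Int :=
  let first := PySem.List.pyGetD record 0 0
  let transitions := ((PySem.List.pyRange 1 (record.length : Int) 1).filter
      (fun i => decide (PySem.List.pyGetD record i 0 ≠ PySem.List.pyGetD record (i-1) 0))).map
      (fun i => PySem.List.pyGetD record i 0)
  (transitions.length : Int) - PySem.Set.len (PySem.Set.diff (PySem.Set.ofList transitions) [first])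

-- ===== PRECONDITION & SPEC =====
-- Python A reads the first element up front, so it raises IndexError exactly on the empty list.
def Pre_AnalyzeRecord (record : List Int) : Prop := record ≠ []
instance (record : List Int) : Decidable (Pre_AnalyzeRecord record) := by unfold Pre_AnalyzeRecord; infer_instance
def pvWitness_AnalyzeRecord : List Int := ([1, 2, 1])

def Spec_AnalyzeRecord (record : List Int) (out : Int) : Prop := out = AnalyzeRecord_alt record
instance (record : List Int) (out : Int) : Decidable (Spec_AnalyzeRecord record out) := by unfold Spec_AnalyzeRecord; infer_instance

-- ===== CLAIM (what is proved, stated in full; the proofs are below) =====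
def Claim_equal_AnalyzeRecord : Prop := ∀ (record : List Int), Dom_AnalyzeRecord record → Pre_AnalyzeRecord record → Spec_AnalyzeRecord record (AnalyzeRecord record)

-- ===== LEMMAS AND PROOFS =====

-- the (prev, cur) pair read at index i
def pairF (r : List Int) (i : Int) : Int × Int :=
  (PySem.List.pyGetD r (i-1) 0, PySem.List.pyGetD r i 0)

-- A's loop body, on a pair
def stepA (s : List Int × Int) (p : Int × Int) : List Int × Int :=
  if p.1 ≠ p.2 then
    if p.2 ∉ s.1 then (s.1 ++ [p.2], s.2) else (s.1, s.2 + 1)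
  else s

-- targets of the value-changing transitions of a pair list
def TL (P : List (Int × Int)) : List Int :=
  (P.filter (fun p => decide (p.1 ≠ p.2))).map (·.2)

lemma pairMap_aux (r : List Int) : ∀ (k a : Nat), 1 ≤ a → r.length ≤ a + k →
    (PySem.List.pyRange (a : Int) (r.length : Int) 1).map (pairF r)
      = (r.drop (a-1)).zip (r.drop a) := by
  intro k
  induction k with
  | zero =>
      intro a h1 h2
      rw [PySem.List.pyRange_one_eq_nil (by exact_mod_cast h2)]
      have : r.drop a = [] := List.drop_eq_nil_of_le (by omega)
      simp [this]
  | succ k ih =>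
      intro a h1 h2
      by_cases hlt : a < r.length
      · rw [PySem.List.pyRange_one_cons (by exact_mod_cast hlt)]
        have ha1 : ((a : Int) + 1) = ((a+1 : Nat) : Int) := by push_cast; ring
        rw [List.map_cons, ha1, ih (a+1) (by omega) (by omega)]
        have h1' : a - 1 < r.length := by omega
        rw [List.drop_eq_getElem_cons h1', List.drop_eq_getElem_cons hlt]
        have hstep : a - 1 + 1 = a := by omega
        rw [hstep, List.zip_cons_cons]
        congr 1
        unfold pairF
        have e1 : (a : Int) - 1 = ((a-1 : Nat) : Int) := by push_cast [h1]; ring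
        rw [e1, PySem.List.pyGetD_natCast, PySem.List.pyGetD_natCast]
        · simp [hlt, h1']
      · rw [PySem.List.pyRange_one_eq_nil (by exact_mod_cast (by omega : r.length ≤ a))]
        have : r.drop a = [] := List.drop_eq_nil_of_le (by omega)
        simp [this]

lemma pairMap (r : List Int) :
    (PySem.List.pyRange 1 (r.length : Int) 1).map (pairF r) = r.zip r.tail := by
  have := pairMap_aux r r.length 1 (by omega) (by omega)
  simpa [List.drop_one] using this

-- core invariant of A's loop
lemma core (P : List (Int × Int)) : ∀ (temp : List Int) (res : Int),
    (P.foldl stepA (temp, res)).2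
      = res + ((TL P).length : Int) - (((TL P).toFinset \ temp.toFinset).card : Int) := by
  induction P with
  | nil => intro temp res; simp [TL]
  | cons p P ih =>
      intro temp res
      by_cases hne : p.1 ≠ p.2
      · have hTL : TL (p :: P) = p.2 :: TL P := by simp [TL, hne]
        by_cases hmem : p.2 ∈ temp
        · have hstep : stepA (temp, res) p = (temp, res + 1) := by
            simp [stepA, hne, hmem]
          rw [List.foldl_cons, hstep, ih, hTL]
          have hset : (p.2 :: TL P).toFinset \ temp.toFinset = (TL P).toFinset \ temp.toFinset := by
            simp only [List.toFinset_cons]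
            rw [Finset.insert_sdiff_of_mem _ (List.mem_toFinset.mpr hmem)]
          rw [hset]
          simp; ring
        · have hstep : stepA (temp, res) p = (temp ++ [p.2], res) := by
            simp [stepA, hne, hmem]
          rw [List.foldl_cons, hstep, ih, hTL]
          have htemp : (temp ++ [p.2]).toFinset = insert p.2 temp.toFinset := by
            ext z; simp
          rw [htemp]
          have hset : (p.2 :: TL P).toFinset \ temp.toFinset
              = insert p.2 ((TL P).toFinset \ temp.toFinset) := by
            simp only [List.toFinset_cons]
            rw [Finset.insert_sdiff_of_notMem _ (by simpa using hmem)]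
          have hset2 : (TL P).toFinset \ insert p.2 temp.toFinset
              = ((TL P).toFinset \ temp.toFinset).erase p.2 := Finset.sdiff_insert _ _ _
          rw [hset, hset2]
          have hcard : (insert p.2 ((TL P).toFinset \ temp.toFinset)).card
              = (((TL P).toFinset \ temp.toFinset).erase p.2).card + 1 := by
            rw [show insert p.2 ((TL P).toFinset \ temp.toFinset)
                  = insert p.2 (((TL P).toFinset \ temp.toFinset).erase p.2) by
              ext z; simp; tauto]
            exact Finset.card_insert_of_notMem (Finset.notMem_erase _ _)
          rw [hcard]
          simp only [List.length_cons]
          push_cast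
          ring
      · have hstep : stepA (temp, res) p = (temp, res) := by simp [stepA, hne]
        have hTL : TL (p :: P) = TL P := by simp [TL, hne]
        rw [List.foldl_cons, hstep, ih, hTL]

-- the set-difference length equals a Finset cardinality
lemma setlen_eq (T : List Int) (x : Int) :
    PySem.Set.len (PySem.Set.diff (PySem.Set.ofList T) [x])
      = ((T.toFinset \ ({x} : Finset Int)).card : Int) := by
  have hnd : (PySem.Set.ofList T).Nodup := PySem.Set.nodup_ofList T
  have hlist : PySem.Set.diff (PySem.Set.ofList T) [x]
      = (PySem.Set.ofList T).filter (fun y => !([x].contains y)) := rfl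
  have hndf : (PySem.Set.diff (PySem.Set.ofList T) [x]).Nodup := by
    rw [hlist]; exact hnd.filter _
  have hfin : (PySem.Set.diff (PySem.Set.ofList T) [x]).toFinset
      = T.toFinset \ ({x} : Finset Int) := by
    ext z
    rw [List.mem_toFinset, hlist, List.mem_filter]
    simp [PySem.Set.mem_ofList]
  unfold PySem.Set.len
  rw [← List.toFinset_card_of_nodup hndf, hfin]

-- B's transitions list is TL of the pair list
lemma B_transitions (r : List Int) :
    ((PySem.List.pyRange 1 (r.length : Int) 1).filter
        (fun i => decide (PySem.List.pyGetD r i 0 ≠ PySem.List.pyGetD r (i-1) 0))).map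
      (fun i => PySem.List.pyGetD r i 0) = TL (r.zip r.tail) := by
  have h1 : ((PySem.List.pyRange 1 (r.length : Int) 1).filter
        (fun i => decide (PySem.List.pyGetD r i 0 ≠ PySem.List.pyGetD r (i-1) 0))).map
      (fun i => PySem.List.pyGetD r i 0)
      = (((PySem.List.pyRange 1 (r.length : Int) 1).map (pairF r)).filter
          (fun p => decide (p.1 ≠ p.2))).map (·.2) := by
    rw [List.filter_map, List.map_map]
    congr 1
    apply List.filter_congr
    intro i _
    simp only [pairF, Function.comp]
    rw [decide_eq_decide]
    exact ne_comm
  rw [h1, pairMap]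
  rfl

-- ===== VERDICT (by name: the statement is the Claim_ definition above) =====
theorem AnalyzeRecord_spec : Claim_equal_AnalyzeRecord := by
  intro record _ hpre
  unfold Spec_AnalyzeRecord AnalyzeRecord AnalyzeRecord_alt
  obtain ⟨x, xs, rfl⟩ : ∃ y ys, record = y :: ys := by
    cases record with
    | nil => exact absurd rfl hpre
    | cons a l => exact ⟨a, l, rfl⟩
  have hx : PySem.List.pyGetD (x :: xs) 0 0 = x := by
    simp
  have hfoldA : (PySem.List.pyRange 1 ((x :: xs).length : Int) 1).foldl
      (fun (s : List Int × Int) i =>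
        if PySem.List.pyGetD (x :: xs) (i-1) 0 ≠ PySem.List.pyGetD (x :: xs) i 0 then
          if PySem.List.pyGetD (x :: xs) i 0 ∉ s.1 then (s.1 ++ [PySem.List.pyGetD (x :: xs) i 0], s.2)
          else (s.1, s.2 + 1)
        else s)
      ([PySem.List.pyGetD (x :: xs) 0 0], 0)
      = ((x :: xs).zip ((x :: xs).tail)).foldl stepA ([PySem.List.pyGetD (x :: xs) 0 0], 0) := by
    rw [← pairMap (x :: xs), List.foldl_map]
    rfl
  dsimp only
  rw [hfoldA, B_transitions, hx]
  rw [core ((x :: xs).zip ((x :: xs).tail)) [x] 0, setlen_eq]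
  rw [show ([x] : List Int).toFinset = ({x} : Finset Int) from by simp]
  ring
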